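-- pv_equiv track=rewrite | github.com/SophonAlpha/codewars | solutions/5x5_nonogram_solver.py | init_shift
-- ===== SOURCE A (Python) =====
-- def init_shift(squares, max_len):
--     start_pos = 0
--     squares_shftd = []
--     for run in squares:
--         shift = max_len - start_pos - run
--         squares_shftd.append((2 ** run - 1) << shift)
--         start_pos = start_pos + run + 1
--     return squares_shftd
-- ===== SOURCE B (Python) =====
-- def init_shift(squares, max_len):
--     # Recursive formulation: no start-position accumulator and no (2**run-1)<<shift;
--     # each mask is the difference of two powers of two at the remaining length, and
--     # the tail is the same problem with the remaining length shrunk by run+1.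
--     if not squares:
--         return []
--     run = squares[0]
--     head = (1 << max_len) - (1 << (max_len - run))
--     return [head] + init_shift(squares[1:], max_len - run - 1)
-- ===== Notes on version B (the rewrite author's own statement) =====
-- stated objective: alternative
-- what changed: A loops with a start_pos accumulator and computes (2**run-1)<<shift; B is a direct recursion that shrinks max_len itself (no start accumulator exists) and computes each mask as the difference of two powers of two, (1<<t)-(1<<(t-run)).
import Mathlib
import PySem

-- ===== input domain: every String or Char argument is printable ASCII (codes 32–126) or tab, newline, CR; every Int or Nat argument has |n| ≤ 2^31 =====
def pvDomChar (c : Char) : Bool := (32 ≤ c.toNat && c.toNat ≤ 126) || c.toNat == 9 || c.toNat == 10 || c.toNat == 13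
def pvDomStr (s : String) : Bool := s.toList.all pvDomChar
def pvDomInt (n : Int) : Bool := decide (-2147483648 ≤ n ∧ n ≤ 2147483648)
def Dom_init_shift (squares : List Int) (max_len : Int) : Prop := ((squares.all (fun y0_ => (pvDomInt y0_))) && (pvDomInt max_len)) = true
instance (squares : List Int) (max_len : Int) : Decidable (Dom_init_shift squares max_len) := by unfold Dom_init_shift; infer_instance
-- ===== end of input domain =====

-- B replaces A's start_pos-accumulator loop with (2**run-1)<<shift by a direct recursion shrinking max_len, each mask a difference of two powers of two (alternative decomposition, same cost; equal return values on Pre_).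


-- ===== PORT A =====
-- A's loop: state (start_pos, squares_shftd); '2 ** run' and '<< shift' are ported as
-- multiplication by powers of two (exact whenever run ≥ 0 and shift ≥ 0, which Pre_ guarantees;
-- on negative run/shift Python raises, and those inputs are outside Pre_).
def init_shift (squares : List Int) (max_len : Int) : List Int :=
  (squares.foldl
    (fun (st : Int × List Int) run =>
      let shift := max_len - st.1 - run
      (st.1 + run + 1, st.2 ++ [((2 : Int) ^ run.toNat - 1) * (2 : Int) ^ shift.toNat]))
    (0, [])).2

-- ===== PORT B =====
-- B's recursion: '1 << t' is ported as 2 ^ t.toNat (exact whenever t ≥ 0, which Pre_ guarantees;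
-- on negative t Python raises, and those inputs are outside Pre_).
def init_shift_alt (squares : List Int) (max_len : Int) : List Int :=
  match squares with
  | [] => []
  | run :: rest =>
      ((2 : Int) ^ max_len.toNat - (2 : Int) ^ (max_len - run).toNat)
        :: init_shift_alt rest (max_len - run - 1)

-- ===== PRECONDITION & SPEC =====
-- Pre_ excludes exactly the inputs on which the Python A raises: a negative run
-- (TypeError from '<<' on the float '2 ** run - 1') or a negative shift (ValueError from '<<').
def Pre_init_shift (squares : List Int) (max_len : Int) : Prop :=
  ∀ i : Nat, i < squares.length →
    0 ≤ squares.getD i 0 ∧ (squares.take i).sum + i + squares.getD i 0 ≤ max_len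
instance (squares : List Int) (max_len : Int) : Decidable (Pre_init_shift squares max_len) := by
  unfold Pre_init_shift; infer_instance

def pvWitness_init_shift : List Int × Int := ([1, 2], 5)

def Spec_init_shift (squares : List Int) (max_len : Int) (out : List Int) : Prop := out = init_shift_alt squares max_len
instance (squares : List Int) (max_len : Int) (out : List Int) : Decidable (Spec_init_shift squares max_len out) := by unfold Spec_init_shift; infer_instance

-- ===== CLAIM (what is proved, stated in full; the proofs are below) =====
def Claim_equal_init_shift : Prop := ∀ (squares : List Int) (max_len : Int), Dom_init_shift squares max_len → Pre_init_shift squares max_len → Spec_init_shift squares max_len (init_shift squares max_len)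

-- ===== LEMMAS AND PROOFS =====

-- recursive form of Pre_: each run is nonnegative and fits in the remaining length
def pvGood : List Int → Int → Prop
  | [], _ => True
  | run :: rest, t => 0 ≤ run ∧ run ≤ t ∧ pvGood rest (t - run - 1)

theorem pvPre_good :
    ∀ (l : List Int) (m : Int), Pre_init_shift l m → pvGood l m := by
  intro l
  induction l with
  | nil => intro m _; trivial
  | cons run rest ih =>
      intro m h
      have h0 := h 0 (by simp)
      simp at h0
      refine ⟨h0.1, by omega, ih (m - run - 1) ?_⟩
      intro i hi
      have hs := h (i + 1) (by simpa using Nat.succ_lt_succ hi)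
      simp only [List.take_succ_cons, List.getD, List.getElem?_cons_succ, List.sum_cons] at hs ⊢
      omega

theorem pvA_eq_alt (max_len : Int) :
    ∀ (l : List Int) (s0 : Int) (acc : List Int), pvGood l (max_len - s0) →
      (l.foldl
        (fun (st : Int × List Int) run =>
          let shift := max_len - st.1 - run
          (st.1 + run + 1, st.2 ++ [((2 : Int) ^ run.toNat - 1) * (2 : Int) ^ shift.toNat]))
        (s0, acc)).2 = acc ++ init_shift_alt l (max_len - s0) := by
  intro l
  induction l with
  | nil => intro s0 acc _; simp [init_shift_alt]
  | cons run rest ih =>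
      intro s0 acc hg
      obtain ⟨h0, h1, hrest⟩ := hg
      simp only [List.foldl_cons, init_shift_alt]
      have hrec := ih (s0 + run + 1) (acc ++ [((2 : Int) ^ run.toNat - 1) * (2 : Int) ^ (max_len - s0 - run).toNat])
        (by have : max_len - (s0 + run + 1) = max_len - s0 - run - 1 := by ring
            rw [this]; exact hrest)
      rw [hrec]
      have hpow : ((2 : Int) ^ run.toNat - 1) * (2 : Int) ^ (max_len - s0 - run).toNat
          = (2 : Int) ^ (max_len - s0).toNat - (2 : Int) ^ (max_len - s0 - run).toNat := by
        have ht : (max_len - s0).toNat = run.toNat + (max_len - s0 - run).toNat := by omega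
        rw [ht, pow_add]; ring
      have hm : max_len - (s0 + run + 1) = max_len - s0 - run - 1 := by ring
      rw [hpow, hm]
      simp

-- ===== VERDICT (by name: the statement is the Claim_ definition above) =====
theorem init_shift_spec : Claim_equal_init_shift := by
  intro squares max_len _ hpre
  unfold Spec_init_shift init_shift
  have := pvA_eq_alt max_len squares 0 [] (by simpa using pvPre_good squares max_len hpre)
  simpa using this
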